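-- pv_equiv track=rewrite | github.com/pypi-data/pypi-mirror-56 | packages/modelbase/modelbase-0.4.5.tar.gz/modelbase-0.4.5/modelbase/ode/labelmodel.py | _generate_compound_labels
-- ===== SOURCE A (Python) =====
-- import itertools
--
-- def _generate_compound_labels(compound_name, carbons):
--     """Convenience function to create binary label string
--
--     Parameters
--     ----------
--     compound_name : str
--         Base name of the compound
--     carbons : int
--         Number of carbons in the compound
--
--     Returns
--     -------
--     list[str]
--         Returns a list of all label isotopomers of the compound
--     """
--     if carbons > 0:
--         return [
--             compound_name + "_" + "".join(i)
--             for i in itertools.product(("0", "1"), repeat=carbons)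
--         ]
--     else:
--         return [compound_name]
-- ===== SOURCE B (Python) =====
-- def _generate_compound_labels(compound_name, carbons):
--     """Binary label strings by counting 0..2**carbons-1 and formatting in binary."""
--     if carbons > 0:
--         return [
--             compound_name + "_" + format(i, "0{}b".format(carbons))
--             for i in range(2 ** carbons)
--         ]
--     else:
--         return [compound_name]
-- ===== Notes on version B (the rewrite author's own statement) =====
-- stated objective: alternative
-- what changed: Replaces the itertools.product cartesian-product enumeration with counting the integers 0..2**carbons-1 and zero-padded binary formatting of each counter.
import Mathlib
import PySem

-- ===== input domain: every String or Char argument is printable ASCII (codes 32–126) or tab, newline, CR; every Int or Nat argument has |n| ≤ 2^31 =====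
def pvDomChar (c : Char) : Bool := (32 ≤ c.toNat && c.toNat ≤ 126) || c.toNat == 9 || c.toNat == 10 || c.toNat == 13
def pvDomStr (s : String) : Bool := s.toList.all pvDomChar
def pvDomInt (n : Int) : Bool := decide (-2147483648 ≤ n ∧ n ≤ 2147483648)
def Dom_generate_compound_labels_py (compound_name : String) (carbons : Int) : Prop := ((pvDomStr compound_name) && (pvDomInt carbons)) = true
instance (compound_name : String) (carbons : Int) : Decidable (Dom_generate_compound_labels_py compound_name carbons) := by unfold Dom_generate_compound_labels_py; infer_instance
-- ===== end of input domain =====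

-- B differs: counts integers 0..2^carbons-1 and formats each in padded binary instead of a cartesian product (alternative, same cost).

-- ===== PORT A =====
-- itertools.product(("0","1"), repeat=n), each tuple already "".join-ed (outermost coordinate varies slowest)
def pvProdA : Nat → List String
  | 0 => [""]
  | n + 1 => (["0", "1"].flatMap fun x => (pvProdA n).map fun s => x ++ s)

def generate_compound_labels_py (compound_name : String) (carbons : Int) : List String :=
  if carbons > 0 then
    (pvProdA carbons.toNat).map fun s => compound_name ++ "_" ++ s
  else
    [compound_name]

-- ===== PORT B =====
-- format(i, "0{w}b"): w binary digits of i, most significant first (exact for i < 2^w)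
def pvPadBin : Nat → Nat → String
  | 0, _ => ""
  | w + 1, i => pvPadBin w (i / 2) ++ (if i % 2 = 1 then "1" else "0")

def generate_compound_labels_py_alt (compound_name : String) (carbons : Int) : List String :=
  if carbons > 0 then
    (List.range (2 ^ carbons.toNat)).map fun i => compound_name ++ "_" ++ pvPadBin carbons.toNat i
  else
    [compound_name]

-- ===== PRECONDITION & SPEC =====
def Spec_generate_compound_labels_py (compound_name : String) (carbons : Int) (out : List String) : Prop := out = generate_compound_labels_py_alt compound_name carbons
instance (compound_name : String) (carbons : Int) (out : List String) : Decidable (Spec_generate_compound_labels_py compound_name carbons out) := by unfold Spec_generate_compound_labels_py; infer_instance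

-- ===== CLAIM (what is proved, stated in full; the proofs are below) =====
def Claim_equal_generate_compound_labels_py : Prop := ∀ (compound_name : String) (carbons : Int), Dom_generate_compound_labels_py compound_name carbons → Spec_generate_compound_labels_py compound_name carbons (generate_compound_labels_py compound_name carbons)

-- ===== LEMMAS AND PROOFS =====

lemma pvPadBin_low {n : Nat} {i : Nat} (h : i < 2 ^ n) :
    pvPadBin (n + 1) i = "0" ++ pvPadBin n i := by
  induction n generalizing i with
  | zero =>
    interval_cases i
    rfl
  | succ n ih =>
    have h2 : i / 2 < 2 ^ n := by omega
    show pvPadBin (n + 1) (i / 2) ++ _ = _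
    rw [ih h2]
    show ("0" ++ pvPadBin n (i / 2)) ++ _ = "0" ++ (pvPadBin n (i / 2) ++ _)
    rw [String.append_assoc]

lemma pvPadBin_high {n : Nat} {i : Nat} (h : i < 2 ^ n) :
    pvPadBin (n + 1) (2 ^ n + i) = "1" ++ pvPadBin n i := by
  induction n generalizing i with
  | zero =>
    interval_cases i
    rfl
  | succ n ih =>
    have hdiv : (2 ^ (n + 1) + i) / 2 = 2 ^ n + i / 2 := by
      rw [pow_succ]
      omega
    have hmod : (2 ^ (n + 1) + i) % 2 = i % 2 := by
      rw [pow_succ]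
      omega
    have h2 : i / 2 < 2 ^ n := by omega
    show pvPadBin (n + 1) ((2 ^ (n + 1) + i) / 2) ++ _ = _
    rw [hdiv, hmod, ih h2]
    show ("1" ++ pvPadBin n (i / 2)) ++ _ = "1" ++ (pvPadBin n (i / 2) ++ _)
    rw [String.append_assoc]

lemma pvProdA_eq (n : Nat) : pvProdA n = (List.range (2 ^ n)).map (pvPadBin n) := by
  induction n with
  | zero => rfl
  | succ n ih =>
    have hr : List.range (2 ^ (n + 1)) =
        List.range (2 ^ n) ++ (List.range (2 ^ n)).map (2 ^ n + ·) := by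
      rw [pow_succ, Nat.mul_two, List.range_add]
    rw [hr]
    show (["0", "1"].flatMap fun x => (pvProdA n).map fun s => x ++ s) = _
    simp only [List.flatMap_cons, List.flatMap_nil, List.append_nil, List.map_append,
      List.map_map, ih]
    congr 1
    · exact List.map_congr_left fun i hi =>
        (pvPadBin_low (List.mem_range.mp hi)).symm
    · exact List.map_congr_left fun i hi =>
        (pvPadBin_high (List.mem_range.mp hi)).symm

-- ===== VERDICT (by name: the statement is the Claim_ definition above) =====
theorem generate_compound_labels_py_spec : Claim_equal_generate_compound_labels_py := by
  intro compound_name carbons _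
  unfold Spec_generate_compound_labels_py generate_compound_labels_py generate_compound_labels_py_alt
  split
  · rw [pvProdA_eq, List.map_map]
    rfl
  · rfl
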